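-- pv_equiv track=rewrite | github.com/Faizanmedico/Python-Program-to-print-pattern-of-SULTAN | pro2.py | get_s_pattern
-- ===== SOURCE A (Python) =====
-- def get_s_pattern(n):
--     """Returns the 'S' pattern as a list of strings."""
--     pattern = []
--     for row in range(n):
--         line = ""
--         for col in range(n):
--             if ((row == 0 or row == n // 2 or row == n - 1) and col > 0 and col < n - 1) or \
--                (col == 0 and row < n // 2) or \
--                (col == n - 1 and row > n // 2):
--                 line += "*"
--             else:
--                 line += " "
--         pattern.append(line)
--     return pattern
-- ===== SOURCE B (Python) =====
-- def get_s_pattern(n):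
--     """Returns the 'S' pattern as a list of strings."""
--     pattern = []
--     for row in range(n):
--         line = [" "] * n
--         if row == 0 or row == n // 2 or row == n - 1:
--             line[1:n - 1] = "*" * (n - 2)
--         if row < n // 2:
--             line[0] = "*"
--         if row > n // 2:
--             line[n - 1] = "*"
--         pattern.append("".join(line))
--     return pattern
-- ===== Notes on version B (the rewrite author's own statement) =====
-- stated objective: simpler
-- what changed: The inner per-cell column loop with its three-clause disjunction is replaced by per-row writes into a [' ']*n buffer: slice-assign the horizontal bar on rows 0, n//2, n-1 and set the single left/right edge star, then join.
import Mathlib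
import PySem

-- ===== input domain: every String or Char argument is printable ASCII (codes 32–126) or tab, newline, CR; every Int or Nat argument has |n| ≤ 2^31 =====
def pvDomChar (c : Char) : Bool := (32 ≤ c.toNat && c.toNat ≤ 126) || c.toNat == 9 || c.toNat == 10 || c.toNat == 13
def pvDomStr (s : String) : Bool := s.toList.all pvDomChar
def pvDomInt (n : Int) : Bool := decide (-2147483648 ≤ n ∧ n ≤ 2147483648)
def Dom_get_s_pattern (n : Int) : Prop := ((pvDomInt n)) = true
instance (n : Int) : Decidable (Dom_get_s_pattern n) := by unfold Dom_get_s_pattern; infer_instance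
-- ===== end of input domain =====

-- B replaces A's per-cell condition test by per-row buffer writes (horizontal segment, then one
-- edge star): simpler — one decision per row instead of one per cell.

-- ===== PORT A =====
-- literal port of Source A: outer row loop; inner col loop appends '*' or ' ' per the cell condition
def get_s_pattern (n : Int) : List String :=
  (PySem.List.pyRange 0 n 1).foldl (fun pattern row =>
    pattern ++ [String.ofList ((PySem.List.pyRange 0 n 1).foldl (fun line col =>
      line ++ (if ((row == 0 || row == PySem.Int.floordiv n 2 || row == n - 1)
                    && col > 0 && col < n - 1)
                || (col == 0 && row < PySem.Int.floordiv n 2)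
                || (col == n - 1 && row > PySem.Int.floordiv n 2)
               then ['*'] else [' '])) [])]) []

-- ===== PORT B =====
-- literal port of Source B: buffer = [' ']*n; slice-assign the horizontal bar; set the edge star.
-- The slice assignment line[1:n-1] = '*'*(n-2) is ported by hand (exact here: with 0 ≤ 1 ≤ len,
-- Python replaces the elements at positions 1..n-2, i.e. l[:1] ++ new ++ l[max(1,n-1):], the max
-- covering the empty slice when n-1 < 1); '*'*(n-2) is List.replicate (n-2).toNat (exact: a
-- non-positive count gives the empty string); line[0]=… / line[n-1]=… are List.set (exact: both
-- indices are in range whenever their guard fires, since 0 ≤ row < n there).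
def get_s_pattern_alt (n : Int) : List String :=
  (PySem.List.pyRange 0 n 1).foldl (fun pattern row =>
    let line := List.replicate n.toNat ' '
    let line := if row == 0 || row == PySem.Int.floordiv n 2 || row == n - 1 then
        line.take 1 ++ List.replicate (n - 2).toNat '*' ++ line.drop (max (n - 1) 1).toNat
      else line
    let line := if row < PySem.Int.floordiv n 2 then line.set 0 '*' else line
    let line := if row > PySem.Int.floordiv n 2 then line.set (n - 1).toNat '*' else line
    pattern ++ [String.ofList line]) []

-- ===== PRECONDITION & SPEC =====
def Spec_get_s_pattern (n : Int) (out : List String) : Prop := out = get_s_pattern_alt n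
instance (n : Int) (out : List String) : Decidable (Spec_get_s_pattern n out) := by unfold Spec_get_s_pattern; infer_instance

-- ===== CLAIM (what is proved, stated in full; the proofs are below) =====
def Claim_equal_get_s_pattern : Prop := ∀ (n : Int), Dom_get_s_pattern n → Spec_get_s_pattern n (get_s_pattern n)

-- ===== LEMMAS AND PROOFS =====

-- the row built cell-by-cell by A equals the buffer row written segment-wise by B
theorem row_eq (n row : Int) (hr : 0 ≤ row) (hrn : row < n) :
    String.ofList ((PySem.List.pyRange 0 n 1).foldl (fun line col =>
      line ++ (if ((row == 0 || row == PySem.Int.floordiv n 2 || row == n - 1)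
                    && col > 0 && col < n - 1)
                || (col == 0 && row < PySem.Int.floordiv n 2)
                || (col == n - 1 && row > PySem.Int.floordiv n 2)
               then ['*'] else [' '])) []) =
    String.ofList (
      let line := List.replicate n.toNat ' '
      let line := if row == 0 || row == PySem.Int.floordiv n 2 || row == n - 1 then
          line.take 1 ++ List.replicate (n - 2).toNat '*' ++ line.drop (max (n - 1) 1).toNat
        else line
      let line := if row < PySem.Int.floordiv n 2 then line.set 0 '*' else line
      if row > PySem.Int.floordiv n 2 then line.set (n - 1).toNat '*' else line) := by
  have hn : 0 < n := lt_of_le_of_lt hr hrn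
  have hsing : ∀ (c : Bool), (if c = true then (['*'] : List Char) else [' ']) =
      [if c = true then '*' else ' '] := by intro c; cases c <;> rfl
  simp only [hsing]
  rw [PySem.List.foldl_append_singleton_eq_map]
  simp only [List.nil_append]
  congr 1
  set q := PySem.Int.floordiv n 2 with hq
  have hqb : q * 2 ≤ n ∧ n < (q + 1) * 2 :=
    (PySem.Int.floordiv_eq_iff_of_pos (by norm_num)).1 hq.symm
  apply List.ext_getElem
  · simp only [PySem.List.length_pyRange_one, List.length_map]
    split_ifs <;>
      simp only [List.length_set, List.length_append, List.length_replicate,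
        List.length_take, List.length_drop] <;> omega
  · intro j h1 h2
    simp only [List.getElem_map, PySem.List.getElem_pyRange_one, zero_add]
    have hjn : (j : Int) < n := by
      simp only [List.length_map, PySem.List.length_pyRange_one] at h1; omega
    simp only [beq_iff_eq, decide_eq_true_eq, Bool.or_eq_true, Bool.and_eq_true]
    split_ifs <;>
      simp only [List.getElem_set, List.take_replicate, List.drop_replicate,
        List.length_replicate, List.getElem_append, List.getElem_replicate] <;>
      first
        | rfl | (exfalso; omega)
        | ((try simp only [List.length_append, List.length_replicate])
           split_ifs <;> first | rfl | (exfalso; omega))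

-- ===== VERDICT (by name: the statement is the Claim_ definition above) =====
theorem get_s_pattern_spec : Claim_equal_get_s_pattern := by
  intro n _
  unfold Spec_get_s_pattern get_s_pattern get_s_pattern_alt
  rw [PySem.List.foldl_append_singleton_eq_map, PySem.List.foldl_append_singleton_eq_map]
  simp only [List.nil_append]
  apply List.map_congr_left
  intro row hrow
  rw [PySem.List.mem_pyRange_one] at hrow
  exact row_eq n row hrow.1 hrow.2
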